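-- pv_equiv track=rewrite | github.com/Molyleaf/MT-Photos-AI-OpenVINO | app/models.py | _rapidocr_execution_matches_requested_device
-- ===== SOURCE A (Python) =====
-- from typing import Any, Callable, Deque, Dict, List, Literal, Optional, Tuple
--
-- def _normalize_openvino_devices(devices: Any) -> List[str]:
--     normalized: List[str] = []
--     for item in devices or []:
--         device_name = str(item).strip().upper().strip("()")
--         if device_name:
--             normalized.append(device_name)
--     return normalized
--
-- def _get_openvino_gpu_devices(devices: Any) -> List[str]:
--     gpu_devices: List[str] = []
--     seen: set[str] = set()
--     for device_name in _normalize_openvino_devices(devices):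
--         if not device_name.startswith("GPU") or device_name in seen:
--             continue
--         gpu_devices.append(device_name)
--         seen.add(device_name)
--     return gpu_devices
--
-- def _has_openvino_gpu_device(devices: Any) -> bool:
--     return bool(_get_openvino_gpu_devices(devices))
--
-- def _dedupe_preserve_order(tokens: List[str]) -> List[str]:
--     deduped: List[str] = []
--     seen: set[str] = set()
--     for token in tokens:
--         if token in seen:
--             continue
--         deduped.append(token)
--         seen.add(token)
--     return deduped
--
-- def _split_openvino_device_expr(device_expr: str) -> List[str]:
--     normalized = str(device_expr or "").strip().upper()
--     if not normalized:
--         return []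
--
--     prefix, separator, suffix = normalized.partition(":")
--     if prefix in {"AUTO", "MULTI", "HETERO", "BATCH"} and separator:
--         raw_tokens = suffix.split(",")
--     else:
--         raw_tokens = normalized.replace(";", ",").split(",")
--
--     return _dedupe_preserve_order([token.strip() for token in raw_tokens if token.strip()])
--
-- def _openvino_device_expr_requests_gpu(device_expr: str) -> bool:
--     normalized = str(device_expr or "").strip().upper()
--     if not normalized:
--         return False
--     if normalized.startswith("GPU"):
--         return True
--     return any(token.startswith("GPU") for token in _split_openvino_device_expr(normalized))
--
-- def _openvino_device_expr_requests_cpu(device_expr: str) -> bool: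
--     normalized = str(device_expr or "").strip().upper()
--     if not normalized:
--         return False
--     if normalized.startswith("CPU"):
--         return True
--     return any(token.startswith("CPU") for token in _split_openvino_device_expr(normalized))
--
-- def _openvino_device_expr_requests_npu(device_expr: str) -> bool:
--     normalized = str(device_expr or "").strip().upper()
--     if not normalized:
--         return False
--     if normalized.startswith("NPU"):
--         return True
--     return any(token.startswith("NPU") for token in _split_openvino_device_expr(normalized))
--
-- def _rapidocr_execution_matches_requested_device(
--     requested_device: str,
--     actual_devices: List[str],
-- ) -> bool:
--     normalized_actual = _normalize_openvino_devices(actual_devices)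
--     if not normalized_actual:
--         return False
--     if _openvino_device_expr_requests_gpu(requested_device):
--         return _has_openvino_gpu_device(normalized_actual)
--     if _openvino_device_expr_requests_cpu(requested_device):
--         return any(device_name.startswith("CPU") for device_name in normalized_actual)
--     if _openvino_device_expr_requests_npu(requested_device):
--         return any(device_name.startswith("NPU") for device_name in normalized_actual)
--     return False
-- ===== SOURCE B (Python) =====
-- def _rapidocr_execution_matches_requested_device(requested_device, actual_devices):
--     bit = {"GPU": 4, "CPU": 2, "NPU": 1}
--     act_mask = 0
--     for item in actual_devices or []:
--         name = str(item).strip().upper().strip("()")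
--         if name:
--             act_mask |= bit.get(name[:3], 0) | 8  # bit 8: at least one device present
--     expr = str(requested_device or "").strip().upper()
--     head, sep, tail = expr.partition(":")
--     body = tail if sep and head in ("AUTO", "MULTI", "HETERO", "BATCH") else expr.replace(";", ",")
--     req_mask = bit.get(expr[:3], 0)
--     for tok in body.split(","):
--         req_mask |= bit.get(tok.strip()[:3], 0)
--     if act_mask & 8 == 0 or req_mask == 0:
--         return False
--     top = 1 << (req_mask.bit_length() - 1)  # highest-priority requested family (GPU=4 > CPU=2 > NPU=1)
--     return bool(act_mask & top)
-- ===== Notes on version B (the rewrite author's own statement) =====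
-- stated objective: alternative
-- what changed: Replaces A's branch-cascade of per-family helper scans by integer bitmask arithmetic: one fold over the devices and one fold over the expression tokens each accumulate a 4-bit mask via a 3-char-prefix dict lookup, and the answer is computed arithmetically as act_mask AND the top set bit of req_mask (GPU=4 > CPU=2 > NPU=1), with no per-family branches or re-scans at all.
-- outside the precondition, e.g. on _rapidocr_execution_matches_requested_device('GPU', ['( (gpu']): A returns True, B returns False
import Mathlib
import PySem

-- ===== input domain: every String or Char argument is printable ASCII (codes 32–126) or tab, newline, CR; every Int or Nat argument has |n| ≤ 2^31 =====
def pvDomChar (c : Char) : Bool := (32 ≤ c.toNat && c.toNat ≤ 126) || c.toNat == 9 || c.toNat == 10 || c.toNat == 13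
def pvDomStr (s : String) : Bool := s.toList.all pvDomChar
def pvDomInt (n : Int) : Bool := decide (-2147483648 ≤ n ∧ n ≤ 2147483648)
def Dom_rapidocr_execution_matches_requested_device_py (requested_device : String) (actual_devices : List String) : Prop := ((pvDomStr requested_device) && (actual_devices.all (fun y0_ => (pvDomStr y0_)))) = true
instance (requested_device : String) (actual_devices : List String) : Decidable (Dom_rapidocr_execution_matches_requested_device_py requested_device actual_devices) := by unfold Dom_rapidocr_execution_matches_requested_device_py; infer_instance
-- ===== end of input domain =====

-- B replaces A's per-family helper scans and branch cascade by bitmask arithmetic: two accumulating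
-- folds build a device mask and a request mask, and the answer is act_mask AND top-bit(req_mask)
-- (objective: alternative algorithm/data structure).

-- shared vocabulary: the '(gpu)'-style name normalization str(x).strip().upper().strip("()"), used by both Pythons
def pvNorm1 (item : List Char) : List Char :=
  PySem.Chars.stripChars (PySem.Chars.upper (PySem.Chars.strip item)) ['(', ')']

-- ===== PORT A =====
-- _normalize_openvino_devices (str(item) is the identity on str; 'devices or []' iterates the same list)
def pvNormA (devices : List (List Char)) : List (List Char) :=
  devices.foldl (fun normalized item =>
    if (pvNorm1 item).isEmpty then normalized else normalized ++ [pvNorm1 item]) []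

-- _get_openvino_gpu_devices
def pvGpuDevicesA (devices : List (List Char)) : List (List Char) :=
  ((pvNormA devices).foldl
    (fun (st : List (List Char) × PySem.Set (List Char)) deviceName =>
      if !(PySem.Chars.startswith deviceName ['G', 'P', 'U']) || PySem.Set.contains st.2 deviceName then st
      else (st.1 ++ [deviceName], PySem.Set.add st.2 deviceName))
    ([], PySem.Set.empty)).1

-- _has_openvino_gpu_device
def pvHasGpuA (devices : List (List Char)) : Bool := !(pvGpuDevicesA devices).isEmpty

-- _dedupe_preserve_order
def pvDedupeA (tokens : List (List Char)) : List (List Char) :=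
  (tokens.foldl
    (fun (st : List (List Char) × PySem.Set (List Char)) token =>
      if PySem.Set.contains st.2 token then st
      else (st.1 ++ [token], PySem.Set.add st.2 token))
    ([], PySem.Set.empty)).1

-- _split_openvino_device_expr ('partition(":") / prefix in {...} and separator' rendered with find, exact)
def pvSplitExprA (deviceExpr : List Char) : List (List Char) :=
  let normalized := PySem.Chars.upper (PySem.Chars.strip deviceExpr)
  if normalized.isEmpty then []
  else
    let i := PySem.Chars.find normalized [':']
    let rawTokens :=
      if i ≠ -1 ∧ [['A','U','T','O'], ['M','U','L','T','I'], ['H','E','T','E','R','O'], ['B','A','T','C','H']].contains (normalized.take i.toNat) then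
        PySem.Chars.splitOn (normalized.drop (i.toNat + 1)) [',']
      else
        PySem.Chars.splitOn (PySem.Chars.replace normalized [';'] [',']) [',']
    pvDedupeA ((rawTokens.map PySem.Chars.strip).filter (fun t => !t.isEmpty))

-- _openvino_device_expr_requests_gpu/cpu/npu (one body, three literal families)
def pvRequestsA (deviceExpr : List Char) (family : List Char) : Bool :=
  let normalized := PySem.Chars.upper (PySem.Chars.strip deviceExpr)
  if normalized.isEmpty then false
  else if PySem.Chars.startswith normalized family then true
  else (pvSplitExprA normalized).any (fun token => PySem.Chars.startswith token family)

def rapidocr_execution_matches_requested_device_py (requested_device : String) (actual_devices : List String) : Bool :=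
  let normalizedActual := pvNormA (actual_devices.map String.toList)
  if normalizedActual.isEmpty then false
  else if pvRequestsA requested_device.toList ['G', 'P', 'U'] then pvHasGpuA normalizedActual
  else if pvRequestsA requested_device.toList ['C', 'P', 'U'] then
    normalizedActual.any (fun d => PySem.Chars.startswith d ['C', 'P', 'U'])
  else if pvRequestsA requested_device.toList ['N', 'P', 'U'] then
    normalizedActual.any (fun d => PySem.Chars.startswith d ['N', 'P', 'U'])
  else false

-- ===== PORT B =====
-- the literal dict bit = {"GPU": 4, "CPU": 2, "NPU": 1}, built key by key
def pvBitDict : PySem.Dict (List Char) Nat :=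
  ((PySem.Dict.empty.insert ['G','P','U'] 4).insert ['C','P','U'] 2).insert ['N','P','U'] 1

-- bit.get(s[:3], 0)  (s[:3] is the nonnegative-bound slice)
def pvFamBit (s : List Char) : Nat :=
  PySem.Dict.getD pvBitDict (PySem.List.slice s none (some 3)) 0

-- body = tail if sep and head in (...) else expr.replace(";", ",")  (partition(":") rendered with find)
def pvBodyB (expr : List Char) : List Char :=
  let i := PySem.Chars.find expr [':']
  if i ≠ -1 ∧ [['A','U','T','O'], ['M','U','L','T','I'], ['H','E','T','E','R','O'], ['B','A','T','C','H']].contains (expr.take i.toNat) then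
    expr.drop (i.toNat + 1)
  else PySem.Chars.replace expr [';'] [',']

-- masks are Python non-negative small ints, carried as Nat (|, &, << agree with Python there);
-- 'name' from Source B is inlined as pvNorm1 item; 1 << (m.bit_length() - 1) is PySem.Int.bitLength
def rapidocr_execution_matches_requested_device_py_alt (requested_device : String) (actual_devices : List String) : Bool :=
  let actMask := (actual_devices.map String.toList).foldl
    (fun m item => if (pvNorm1 item).isEmpty then m else m ||| pvFamBit (pvNorm1 item) ||| 8) 0
  let expr := PySem.Chars.upper (PySem.Chars.strip requested_device.toList)
  let reqMask := (PySem.Chars.splitOn (pvBodyB expr) [',']).foldl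
    (fun m tok => m ||| pvFamBit (PySem.Chars.strip tok)) (pvFamBit expr)
  if actMask &&& 8 == 0 || reqMask == 0 then false
  else actMask &&& (1 <<< (PySem.Int.bitLength (reqMask : Int) - 1)) != 0

-- ===== PRECONDITION & SPEC =====
-- Pre_ excludes actual device names (such as '( (gpu') whose strip().upper().strip("()") normal form still has
-- whitespace at an end: only there A's GPU path, which normalizes device names a second time, can classify a
-- name as GPU that its once-normalized form (used by A itself on the CPU/NPU paths, and by B everywhere) does not.
def Pre_rapidocr_execution_matches_requested_device_py (requested_device : String) (actual_devices : List String) : Prop :=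
  ∀ d ∈ actual_devices,
    PySem.Chars.strip (PySem.Chars.stripChars (PySem.Chars.upper (PySem.Chars.strip d.toList)) ['(', ')'])
      = PySem.Chars.stripChars (PySem.Chars.upper (PySem.Chars.strip d.toList)) ['(', ')']
instance (requested_device : String) (actual_devices : List String) : Decidable (Pre_rapidocr_execution_matches_requested_device_py requested_device actual_devices) := by unfold Pre_rapidocr_execution_matches_requested_device_py; infer_instance

def pvWitness_rapidocr_execution_matches_requested_device_py : String × List String := ("AUTO:GPU,CPU", ["(gpu)", "cpu"])

def Spec_rapidocr_execution_matches_requested_device_py (requested_device : String) (actual_devices : List String) (out : Bool) : Prop := out = rapidocr_execution_matches_requested_device_py_alt requested_device actual_devices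
instance (requested_device : String) (actual_devices : List String) (out : Bool) : Decidable (Spec_rapidocr_execution_matches_requested_device_py requested_device actual_devices out) := by unfold Spec_rapidocr_execution_matches_requested_device_py; infer_instance

-- ===== CLAIM (what is proved, stated in full; the proofs are below) =====
def Claim_equal_rapidocr_execution_matches_requested_device_py : Prop := ∀ (requested_device : String) (actual_devices : List String), Dom_rapidocr_execution_matches_requested_device_py requested_device actual_devices → Pre_rapidocr_execution_matches_requested_device_py requested_device actual_devices → Spec_rapidocr_execution_matches_requested_device_py requested_device actual_devices (rapidocr_execution_matches_requested_device_py requested_device actual_devices)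

-- ===== LEMMAS AND PROOFS =====

-- proof-side vocabulary: the stripped token list of B's body, and the 4-bit mask encoder
def pvToks (expr : List Char) : List (List Char) :=
  (PySem.Chars.splitOn (pvBodyB expr) [',']).map PySem.Chars.strip

def pvEnc (e g c n : Bool) : Nat :=
  (if e then 8 else 0) ||| (if g then 4 else 0) ||| (if c then 2 else 0) ||| (if n then 1 else 0)

-- both strip and strip("()") are "drop p from both ends":
def pvTrim (p : Char → Bool) (l : List Char) : List Char :=
  (List.dropWhile p (List.dropWhile p l).reverse).reverse

theorem pv_strip_eq_trim (l : List Char) : PySem.Chars.strip l = pvTrim PySem.Chars.isspace l := rfl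

theorem pv_stripChars_eq_trim (l cs : List Char) :
    PySem.Chars.stripChars l cs = pvTrim (fun c => cs.contains c) l := rfl

theorem pv_trim_map (p : Char → Bool) (f : Char → Char) (h : ∀ c, p (f c) = p c) (l : List Char) :
    pvTrim p (l.map f) = (pvTrim p l).map f := by
  have hpf : (p ∘ f) = p := funext h
  simp only [pvTrim, List.dropWhile_map, hpf, ← List.map_reverse]

theorem pv_dropWhile_eq_self_of_cons (p : Char → Bool) (r : List Char)
    (h : ∀ x xs, r = x :: xs → p x = false) : List.dropWhile p r = r := by
  cases r with
  | nil => rfl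
  | cons x xs => rw [List.dropWhile_cons, if_neg]; simp [h x xs rfl]

theorem pv_head_dropWhile (p : Char → Bool) (l : List Char) (x : Char) (xs : List Char)
    (h : List.dropWhile p l = x :: xs) : p x = false := by
  induction l with
  | nil => simp at h
  | cons c cs ih =>
    rw [List.dropWhile_cons] at h
    split at h
    · exact ih h
    · next hc =>
      cases h
      simpa using hc

theorem pv_trim_idem (p : Char → Bool) (l : List Char) : pvTrim p (pvTrim p l) = pvTrim p l := by
  show (List.dropWhile p (List.dropWhile p
      ((List.dropWhile p (List.dropWhile p l).reverse).reverse)).reverse).reverse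
    = (List.dropWhile p (List.dropWhile p l).reverse).reverse
  have hpre : (List.dropWhile p (List.dropWhile p l).reverse).reverse <+: List.dropWhile p l := by
    have := List.reverse_prefix.mpr (List.dropWhile_suffix (l := (List.dropWhile p l).reverse) p)
    rwa [List.reverse_reverse] at this
  have h1 : List.dropWhile p ((List.dropWhile p (List.dropWhile p l).reverse).reverse)
      = (List.dropWhile p (List.dropWhile p l).reverse).reverse := by
    apply pv_dropWhile_eq_self_of_cons
    intro x xs hx
    obtain ⟨t, ht⟩ := hpre
    exact pv_head_dropWhile p l x (xs ++ t) (by rw [← ht, hx]; simp)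
  rw [h1, List.reverse_reverse, List.dropWhile_idempotent]

theorem pv_upper_toNat (c : Char) (h1 : 'a' ≤ c) (h2 : c ≤ 'z') :
    (Char.ofNat (c.toNat - 32)).toNat = c.toNat - 32 := by
  have h1' : 97 ≤ c.toNat := h1
  have h2' : c.toNat ≤ 122 := h2
  rw [Char.toNat_ofNat, if_pos]
  exact Or.inl (by omega)

theorem pv_isspace_upperChar (c : Char) :
    PySem.Chars.isspace (PySem.Chars.upperChar c) = PySem.Chars.isspace c := by
  unfold PySem.Chars.upperChar
  split
  · next h =>
    unfold PySem.Chars.islower at h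
    simp only [Bool.and_eq_true, decide_eq_true_eq] at h
    have ht := pv_upper_toNat c h.1 h.2
    have h1' : 97 ≤ c.toNat := h.1
    have h2' : c.toNat ≤ 122 := h.2
    unfold PySem.Chars.isspace
    refine Bool.eq_iff_iff.mpr ?_
    simp only [ht, Bool.or_eq_true, Bool.and_eq_true, decide_eq_true_eq]
    omega
  · rfl

theorem pv_upperChar_idem (c : Char) :
    PySem.Chars.upperChar (PySem.Chars.upperChar c) = PySem.Chars.upperChar c := by
  unfold PySem.Chars.upperChar
  split
  · next h =>
    unfold PySem.Chars.islower at h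
    simp only [Bool.and_eq_true, decide_eq_true_eq] at h
    have ht := pv_upper_toNat c h.1 h.2
    have h1' : 97 ≤ c.toNat := h.1
    have h2' : c.toNat ≤ 122 := h.2
    rw [if_neg]
    intro hcon
    unfold PySem.Chars.islower at hcon
    simp only [Bool.and_eq_true, decide_eq_true_eq] at hcon
    have : 97 ≤ (Char.ofNat (c.toNat - 32)).toNat := hcon.1
    omega
  · rfl

theorem pv_map_upperChar_idem (l : List Char) :
    (l.map PySem.Chars.upperChar).map PySem.Chars.upperChar = l.map PySem.Chars.upperChar := by
  rw [List.map_map]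
  exact List.map_congr_left fun c _ => pv_upperChar_idem c

theorem pv_strip_upper_strip (e : List Char) :
    PySem.Chars.strip (PySem.Chars.upper (PySem.Chars.strip e)) = PySem.Chars.upper (PySem.Chars.strip e) := by
  simp only [PySem.Chars.upper, pv_strip_eq_trim]
  rw [pv_trim_map _ _ pv_isspace_upperChar, pv_trim_idem]

theorem pv_upper_upper_strip (e : List Char) :
    PySem.Chars.upper (PySem.Chars.upper (PySem.Chars.strip e)) = PySem.Chars.upper (PySem.Chars.strip e) := by
  simp only [PySem.Chars.upper]
  exact pv_map_upperChar_idem _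

-- the dedupe loop preserves `any`
theorem pv_dedupe_fold_any (q : List Char → Bool) (l : List (List Char)) :
    ∀ (acc : List (List Char)) (seen : PySem.Set (List Char)),
      ((l.foldl (fun (st : List (List Char) × PySem.Set (List Char)) token =>
          if PySem.Set.contains st.2 token then st
          else (st.1 ++ [token], PySem.Set.add st.2 token)) (acc, seen)).1).any q
        = (acc.any q || l.any fun x => q x && !(PySem.Set.contains seen x)) := by
  induction l with
  | nil => intro acc seen; simp
  | cons x xs ih =>
    intro acc seen
    simp only [List.foldl_cons, List.any_cons]
    by_cases hc : PySem.Set.contains seen x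
    · rw [if_pos hc, ih, hc]
      simp
    · rw [if_neg hc]
      have hadd : PySem.Set.add seen x = seen ++ [x] := by
        simp [PySem.Set.add, PySem.Set.contains] at hc ⊢
        simp [hc]
      rw [ih, hadd]
      have hcf : PySem.Set.contains seen x = false := by simpa using hc
      simp only [List.any_append, List.any_cons, List.any_nil, Bool.or_false, hcf]
      simp only [Bool.not_false, Bool.and_true, Bool.or_assoc]
      congr 1
      by_cases hq : q x
      · simp [hq]
      · simp only [hq, Bool.false_or]
        apply List.any_congr rfl
        intro y
        by_cases hyx : y = x
        · subst hyx
          simp [hq]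
        · simp [PySem.Set.contains, hyx]

theorem pv_dedupe_any (q : List Char → Bool) (l : List (List Char)) :
    (pvDedupeA l).any q = l.any q := by
  rw [pvDedupeA, pv_dedupe_fold_any]
  simp [PySem.Set.contains, PySem.Set.empty]

-- the GPU collect loop's emptiness
theorem pv_gpu_fold_empty (p : List Char → Bool) (l : List (List Char)) :
    ∀ (acc : List (List Char)) (seen : PySem.Set (List Char)),
      ((l.foldl (fun (st : List (List Char) × PySem.Set (List Char)) x =>
          if !(p x) || PySem.Set.contains st.2 x then st
          else (st.1 ++ [x], PySem.Set.add st.2 x)) (acc, seen)).1).isEmpty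
        = (acc.isEmpty && l.all fun x => !(p x) || PySem.Set.contains seen x) := by
  induction l with
  | nil => intro acc seen; simp
  | cons x xs ih =>
    intro acc seen
    simp only [List.foldl_cons, List.all_cons]
    by_cases hc : (!(p x) || PySem.Set.contains seen x) = true
    · rw [if_pos hc, ih, hc]
      simp
    · rw [if_neg hc, ih]
      have h1 : (acc ++ [x]).isEmpty = false := by simp
      have h2 : (!p x || PySem.Set.contains seen x) = false := by simpa using hc
      rw [h1, h2]
      simp

theorem pv_token_startswith_nonempty (f : List Char) (hf : f ≠ []) (t : List Char) :
    ((!t.isEmpty) && PySem.Chars.startswith t f) = PySem.Chars.startswith t f := by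
  cases t with
  | nil =>
    cases f with
    | nil => exact absurd rfl hf
    | cons c f' => simp [PySem.Chars.startswith, List.isPrefixOf]
  | cons c t' => simp

-- A's per-family request test, in terms of B's token list
theorem pv_requests_eq (e f : List Char) (hf : f ≠ []) :
    pvRequestsA e f
      = (PySem.Chars.startswith (PySem.Chars.upper (PySem.Chars.strip e)) f
          || (pvToks (PySem.Chars.upper (PySem.Chars.strip e))).any
               (fun t => PySem.Chars.startswith t f)) := by
  set expr := PySem.Chars.upper (PySem.Chars.strip e) with hexpr
  by_cases hE : expr.isEmpty
  · have hnil : expr = [] := List.isEmpty_iff.mp hE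
    obtain ⟨c, f', rfl⟩ : ∃ c f', f = c :: f' := by
      cases f with
      | nil => exact absurd rfl hf
      | cons c f' => exact ⟨c, f', rfl⟩
    rw [pvRequestsA, ← hexpr, if_pos hE, hnil]
    have htok : pvToks [] = [[]] := by decide
    rw [htok]
    simp [PySem.Chars.startswith, List.isPrefixOf]
  · have hstrip : PySem.Chars.strip expr = expr := pv_strip_upper_strip e
    have hupper : PySem.Chars.upper (PySem.Chars.strip expr) = expr := by
      rw [hstrip, hexpr]
      exact pv_upper_upper_strip e
    rw [pvRequestsA, ← hexpr, if_neg hE]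
    have hsplit : pvSplitExprA expr
        = pvDedupeA (((pvToks expr).filter (fun t => !t.isEmpty))) := by
      simp only [pvSplitExprA, pvToks, pvBodyB, hupper]
      rw [if_neg hE]
      split <;> rfl
    have hany : (pvSplitExprA expr).any (fun t => PySem.Chars.startswith t f)
        = (pvToks expr).any (fun t => PySem.Chars.startswith t f) := by
      rw [hsplit, pv_dedupe_any, List.any_filter]
      exact List.any_congr rfl fun t => pv_token_startswith_nonempty f hf t
    by_cases hsw : PySem.Chars.startswith expr f
    · simp [hsw]
    · simp [hsw, hany]

-- B's 3-char prefix lookup is the startswith test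
theorem pv_startswith_take (t f : List Char) :
    PySem.Chars.startswith t f = (t.take f.length == f) := by
  rw [Bool.eq_iff_iff, PySem.Chars.startswith_iff, beq_iff_eq, List.prefix_iff_eq_take, eq_comm]

theorem pv_sw3 (t f : List Char) (hf : f.length = 3) :
    PySem.Chars.startswith t f = (t.take 3 == f) := by
  rw [pv_startswith_take, hf]

theorem pv_famBit_eq (s : List Char) :
    pvFamBit s = pvEnc false (s.take 3 == ['G','P','U']) (s.take 3 == ['C','P','U']) (s.take 3 == ['N','P','U']) := by
  have h3 : PySem.List.slice s none (some 3) = s.take 3 := by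
    simpa using PySem.List.slice_to (xs := s) (b := 3) (by norm_num)
  rw [pvFamBit, h3, pvBitDict, PySem.Dict.getD_insert, PySem.Dict.getD_insert, PySem.Dict.getD_insert]
  by_cases hg : s.take 3 = ['G','P','U']
  · rw [hg]; decide
  by_cases hc : s.take 3 = ['C','P','U']
  · rw [hc]; decide
  by_cases hn : s.take 3 = ['N','P','U']
  · rw [hn]; decide
  simp [hg, hc, hn, pvEnc, PySem.Dict.getD_empty]

-- merging encoded masks
theorem pv_lor_enc (m : Nat) (e1 g1 c1 n1 e2 g2 c2 n2 : Bool) :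
    (m ||| pvEnc e1 g1 c1 n1) ||| pvEnc e2 g2 c2 n2
      = m ||| pvEnc (e1 || e2) (g1 || g2) (c1 || c2) (n1 || n2) := by
  cases e1 <;> cases g1 <;> cases c1 <;> cases n1 <;> cases e2 <;> cases g2 <;> cases c2 <;> cases n2 <;>
    simp only [pvEnc, Bool.true_or, Bool.false_or, Bool.or_true, Bool.or_false, reduceIte] <;>
    (rw [Nat.lor_assoc]; congr 1)

theorem pv_enc_lor_enc (e1 g1 c1 n1 e2 g2 c2 n2 : Bool) :
    pvEnc e1 g1 c1 n1 ||| pvEnc e2 g2 c2 n2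
      = pvEnc (e1 || e2) (g1 || g2) (c1 || c2) (n1 || n2) := by
  revert e1 g1 c1 n1 e2 g2 c2 n2; decide

theorem pv_enc_or8 (g c n : Bool) : pvEnc false g c n ||| 8 = pvEnc true g c n := by
  revert g c n; decide

theorem pv_enc8_lor (m : Nat) (g c n e2 g2 c2 n2 : Bool) :
    ((m ||| pvEnc false g c n) ||| 8) ||| pvEnc e2 g2 c2 n2
      = m ||| pvEnc true (g || g2) (c || c2) (n || n2) := by
  rw [Nat.lor_assoc m, pv_enc_or8, pv_lor_enc]
  simp

-- req-mask fold characterization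
theorem pv_reqFold (toks : List (List Char)) (m : Nat) :
    toks.foldl (fun m tok => m ||| pvFamBit (PySem.Chars.strip tok)) m
      = m ||| pvEnc false
          (toks.any (fun t => (PySem.Chars.strip t).take 3 == ['G','P','U']))
          (toks.any (fun t => (PySem.Chars.strip t).take 3 == ['C','P','U']))
          (toks.any (fun t => (PySem.Chars.strip t).take 3 == ['N','P','U'])) := by
  induction toks generalizing m with
  | nil => simp [pvEnc]
  | cons t ts ih =>
    simp only [List.foldl_cons, List.any_cons]
    rw [ih, pv_famBit_eq, pv_lor_enc]
    simp

-- act-mask fold characterization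
theorem pv_actFold (l : List (List Char)) (m : Nat) :
    l.foldl (fun m item => if (pvNorm1 item).isEmpty then m else m ||| pvFamBit (pvNorm1 item) ||| 8) m
      = m ||| pvEnc (!((l.map pvNorm1).filter (fun n => !n.isEmpty)).isEmpty)
          (((l.map pvNorm1).filter (fun n => !n.isEmpty)).any (fun d => d.take 3 == ['G','P','U']))
          (((l.map pvNorm1).filter (fun n => !n.isEmpty)).any (fun d => d.take 3 == ['C','P','U']))
          (((l.map pvNorm1).filter (fun n => !n.isEmpty)).any (fun d => d.take 3 == ['N','P','U'])) := by
  induction l generalizing m with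
  | nil => simp [pvEnc]
  | cons x xs ih =>
    simp only [List.foldl_cons, List.map_cons, List.filter_cons]
    by_cases h : (pvNorm1 x).isEmpty
    · simp only [h, reduceIte, Bool.not_true]
      exact ih m
    · have h' : (!(pvNorm1 x).isEmpty) = true := by simpa using h
      simp only [h, h', reduceIte, if_true, Bool.false_eq_true, if_false, List.isEmpty_cons,
        List.any_cons, Bool.not_false]
      rw [ih, pv_famBit_eq, pv_enc8_lor]

-- the whole bit arithmetic, as a finite boolean fact
theorem pv_final (e g c n rg rc rn : Bool) :
    (if pvEnc e g c n &&& 8 == 0 || pvEnc false rg rc rn == 0 then false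
     else pvEnc e g c n &&& (1 <<< (PySem.Int.bitLength ((pvEnc false rg rc rn : Nat) : Int) - 1)) != 0)
      = (if e then (if rg then g else if rc then c else if rn then n else false) else false) := by
  revert e g c n rg rc rn; decide

-- A's append-if-nonempty normalization loop is a map+filter
theorem pv_normA_eq (l : List (List Char)) :
    pvNormA l = (l.map pvNorm1).filter (fun n => !n.isEmpty) := by
  have hstep : (fun (acc : List (List Char)) item =>
        if (pvNorm1 item).isEmpty then acc else acc ++ [pvNorm1 item])
      = (fun acc item => if (!(pvNorm1 item).isEmpty) = true then acc ++ [pvNorm1 item] else acc) := by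
    funext acc item
    by_cases h : (pvNorm1 item).isEmpty <;> simp [h]
  rw [pvNormA, hstep, PySem.List.foldl_append_if]
  simp [List.filter_map, Function.comp_def]

-- bits needed to relate A's GPU path (which re-normalizes) to the plain scan, under Pre_
theorem pv_paren_upperChar (c : Char) :
    ((['(', ')'] : List Char).contains (PySem.Chars.upperChar c)) = (['(', ')'] : List Char).contains c := by
  unfold PySem.Chars.upperChar
  split
  · next h =>
    unfold PySem.Chars.islower at h
    simp only [Bool.and_eq_true, decide_eq_true_eq] at h
    have ht := pv_upper_toNat c h.1 h.2
    have h1' : 97 ≤ c.toNat := h.1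
    have h2' : c.toNat ≤ 122 := h.2
    refine Bool.eq_iff_iff.mpr ?_
    simp only [List.contains_cons, List.contains_nil, Bool.or_false, Bool.or_eq_true, beq_iff_eq]
    have hop : ('(').toNat = 40 := rfl
    have hcp : (')').toNat = 41 := rfl
    constructor
    · rintro (h | h) <;>
        (exfalso; have h' := congrArg Char.toNat h; rw [ht] at h'; omega)
    · rintro (rfl | rfl) <;> omega
  · rfl

theorem pv_norm1_eq (l : List Char) :
    pvNorm1 l = pvTrim (fun c => (['(', ')'] : List Char).contains c)
      ((pvTrim PySem.Chars.isspace l).map PySem.Chars.upperChar) := by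
  simp only [pvNorm1, pv_stripChars_eq_trim, pv_strip_eq_trim, PySem.Chars.upper]

theorem pv_upper_norm1 (l : List Char) :
    (pvNorm1 l).map PySem.Chars.upperChar = pvNorm1 l := by
  rw [pv_norm1_eq, ← pv_trim_map _ _ pv_paren_upperChar, pv_map_upperChar_idem]

theorem pv_norm1_fix (l : List Char) (h : PySem.Chars.strip (pvNorm1 l) = pvNorm1 l) :
    pvNorm1 (pvNorm1 l) = pvNorm1 l := by
  conv_lhs => rw [pvNorm1, h]
  rw [PySem.Chars.upper, pv_upper_norm1, pv_stripChars_eq_trim, pv_norm1_eq, pv_trim_idem,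
    ← pv_norm1_eq]

-- under Pre_, re-normalizing the normalized device list is the identity, so A's GPU scan is a plain `any`
theorem pv_hasGpu_eq (a : List String)
    (pre : ∀ d ∈ a, PySem.Chars.strip (pvNorm1 d.toList) = pvNorm1 d.toList) :
    pvHasGpuA (pvNormA (a.map String.toList))
      = (pvNormA (a.map String.toList)).any (fun d => PySem.Chars.startswith d ['G', 'P', 'U']) := by
  set normA := pvNormA (a.map String.toList) with hN
  have hmem : ∀ n ∈ normA, pvNorm1 n = n ∧ (!n.isEmpty) = true := by
    intro n hn
    rw [hN, pv_normA_eq] at hn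
    have hprop := List.of_mem_filter hn
    have hmap := List.mem_of_mem_filter hn
    obtain ⟨d, hd, rfl⟩ := List.mem_map.mp hmap
    obtain ⟨s, hs, rfl⟩ := List.mem_map.mp hd
    exact ⟨pv_norm1_fix _ (pre s hs), hprop⟩
  have hNN : pvNormA normA = normA := by
    rw [pv_normA_eq]
    have h1 : normA.map pvNorm1 = normA := by
      rw [show normA.map pvNorm1 = normA.map id from
        List.map_congr_left fun n hn => (hmem n hn).1, List.map_id]
    rw [h1]
    exact List.filter_eq_self.mpr fun n hn => (hmem n hn).2
  rw [pvHasGpuA, pvGpuDevicesA, hNN, pv_gpu_fold_empty]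
  simp only [List.isEmpty_nil, Bool.true_and, PySem.Set.contains, PySem.Set.empty]
  simp only [List.elem_nil, Bool.or_false]
  rw [List.any_eq_not_all_not]

-- ===== VERDICT (by name: the statement is the Claim_ definition above) =====
theorem rapidocr_execution_matches_requested_device_py_spec : Claim_equal_rapidocr_execution_matches_requested_device_py := by
  intro r a _dom pre
  unfold Spec_rapidocr_execution_matches_requested_device_py
  simp only [rapidocr_execution_matches_requested_device_py,
    rapidocr_execution_matches_requested_device_py_alt]
  rw [pv_actFold, Nat.zero_or, pv_reqFold, pv_famBit_eq, pv_enc_lor_enc]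
  rw [show ((a.map String.toList).map pvNorm1).filter (fun n => !n.isEmpty)
      = pvNormA (a.map String.toList) from (pv_normA_eq _).symm]
  rw [pv_requests_eq r.toList ['G','P','U'] (by decide), pv_requests_eq r.toList ['C','P','U'] (by decide),
    pv_requests_eq r.toList ['N','P','U'] (by decide)]
  simp only [Bool.false_or]
  rw [pv_final]
  set expr := PySem.Chars.upper (PySem.Chars.strip r.toList) with hexpr
  have htokany : ∀ f : List Char, f.length = 3 →
      ((PySem.Chars.splitOn (pvBodyB expr) [',']).any (fun t => (PySem.Chars.strip t).take 3 == f))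
        = (pvToks expr).any (fun t => PySem.Chars.startswith t f) := by
    intro f hf
    rw [pvToks, List.any_map]
    exact List.any_congr rfl fun t => (pv_sw3 (PySem.Chars.strip t) f hf).symm
  rw [htokany _ (by decide), htokany _ (by decide), htokany _ (by decide),
    ← pv_sw3 expr ['G','P','U'] (by decide), ← pv_sw3 expr ['C','P','U'] (by decide),
    ← pv_sw3 expr ['N','P','U'] (by decide)]
  rw [pv_hasGpu_eq a pre]
  have hsw : ∀ f : List Char, f.length = 3 →
      ((pvNormA (a.map String.toList)).any (fun d => d.take 3 == f))
        = (pvNormA (a.map String.toList)).any (fun d => PySem.Chars.startswith d f) :=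
    fun f hf => List.any_congr rfl fun d => (pv_sw3 d f hf).symm
  rw [hsw _ (by decide), hsw _ (by decide), hsw _ (by decide)]
  by_cases hE : (pvNormA (a.map String.toList)).isEmpty <;> simp [hE]
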